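-- pv_equiv track=rewrite | github.com/xvrxvr/EventCalendar | soft/solvers/tilegame.py | eval_weight
-- ===== SOURCE A (Python) =====
-- def eval_weight(value: int):
--     value ^= 0xFFFF
--     acc = 0
--     for _ in range(16):
--         if value & 1:
--             acc += 1
--         value >>= 1
--     return acc
-- ===== SOURCE B (Python) =====
-- def eval_weight(value: int):
--     w = (value ^ 0xFFFF) % 0x10000
--     count = 0
--     while w:
--         w &= w - 1
--         count += 1
--     return count
-- ===== Notes on version B (the rewrite author's own statement) =====
-- stated objective: alternative
-- what changed: Replaces the fixed sixteen-round bit-test-and-shift loop by masking to the word's low bits once and counting set bits with Kernighan's w &= w-1 loop, which iterates once per set bit.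
import Mathlib
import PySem

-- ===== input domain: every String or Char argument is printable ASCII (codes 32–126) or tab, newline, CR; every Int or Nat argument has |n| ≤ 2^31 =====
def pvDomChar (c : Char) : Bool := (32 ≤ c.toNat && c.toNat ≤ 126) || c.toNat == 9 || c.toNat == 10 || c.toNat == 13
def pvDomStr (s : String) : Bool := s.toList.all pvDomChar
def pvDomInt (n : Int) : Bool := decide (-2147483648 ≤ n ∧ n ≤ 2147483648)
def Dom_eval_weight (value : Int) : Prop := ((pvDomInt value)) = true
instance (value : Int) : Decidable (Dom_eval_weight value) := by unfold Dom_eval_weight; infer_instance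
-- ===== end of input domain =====

-- B replaces A's fixed sixteen-round bit-test-and-shift loop by a one-time mask to the low
-- word followed by Kernighan's w &= w-1 set-bit-counting loop (alternative algorithm).


-- ===== PORT A =====
-- 'value ^= 0xFFFF', then sixteen rounds of: test the low bit into acc, shift right one.
def eval_weight (value : Int) : Int :=
  let v := PySem.Int.bxor value 65535
  ((PySem.List.pyRange 0 16 1).foldl
    (fun (s : Int × Int) _ => (s.1 >>> (1 : Nat), if PySem.Int.band s.1 1 ≠ 0 then s.2 + 1 else s.2))
    (v, 0)).2

-- ===== PORT B =====
-- Kernighan loop of Source B; w stays a Nat because Source B's '% 0x10000' makes it non-negative,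
-- and the loop terminates because w &&& (w-1) < w for w ≠ 0.
def evalWeightKern (w : Nat) (count : Int) : Int :=
  if w = 0 then count else evalWeightKern (w &&& (w - 1)) (count + 1)
termination_by w
decreasing_by
  have h := Nat.and_le_right (n := w) (m := w - 1); omega

def eval_weight_alt (value : Int) : Int :=
  evalWeightKern ((PySem.Int.mod (PySem.Int.bxor value 65535) 65536).toNat) 0

-- ===== PRECONDITION & SPEC =====
def Spec_eval_weight (value : Int) (out : Int) : Prop := out = eval_weight_alt value
instance (value : Int) (out : Int) : Decidable (Spec_eval_weight value out) := by unfold Spec_eval_weight; infer_instance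

-- ===== CLAIM (what is proved, stated in full; the proofs are below) =====
def Claim_equal_eval_weight : Prop := ∀ (value : Int), Dom_eval_weight value → Spec_eval_weight value (eval_weight value)

-- ===== LEMMAS AND PROOFS =====

/-- Binary popcount, the common yardstick both ports are reduced to. -/
def popM (m : Nat) : Nat :=
  if m = 0 then 0 else m % 2 + popM (m / 2)
termination_by m
decreasing_by omega

lemma popM_zero : popM 0 = 0 := by unfold popM; rfl

lemma popM_eq (m : Nat) : popM m = m % 2 + popM (m / 2) := by
  by_cases h : m = 0
  · subst h; simp [popM_zero]
  · rw [popM]; simp [h]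

-- odd m: m &&& (m-1) clears bit 0
lemma and_pred_odd (m : Nat) (h : m % 2 = 1) : m &&& (m - 1) = m - 1 := by
  apply Nat.eq_of_testBit_eq
  intro i
  rw [Nat.testBit_land]
  cases i with
  | zero => simp [Nat.testBit_zero]; omega
  | succ i =>
      simp only [Nat.testBit_succ]
      have h12 : m / 2 = (m - 1) / 2 := by omega
      rw [h12, Bool.and_self]

-- even m: the Kernighan step commutes with halving
lemma and_pred_even (m : Nat) (h : m % 2 = 0) :
    m &&& (m - 1) = 2 * ((m / 2) &&& (m / 2 - 1)) := by
  apply Nat.eq_of_testBit_eq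
  intro i
  rw [Nat.testBit_land]
  cases i with
  | zero =>
      simp [Nat.testBit_zero]
      omega
  | succ i =>
      simp only [Nat.testBit_succ]
      have h1 : (m - 1) / 2 = m / 2 - 1 := by omega
      have h2 : 2 * (m / 2 &&& (m / 2 - 1)) / 2 = m / 2 &&& (m / 2 - 1) := by omega
      rw [h1, h2, Nat.testBit_land]

/-- Kernighan's step removes exactly one set bit. -/
lemma popM_and_pred (m : Nat) (h0 : m ≠ 0) : popM m = popM (m &&& (m - 1)) + 1 := by
  induction m using Nat.strong_induction_on with
  | _ m ih =>
    rcases Nat.mod_two_eq_zero_or_one m with h | h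
    · rw [and_pred_even m h]
      have hm2 : m / 2 ≠ 0 := by omega
      have hlt : m / 2 < m := by omega
      rw [popM_eq m, h, popM_eq (2 * (m / 2 &&& (m / 2 - 1)))]
      have e1 : 2 * (m / 2 &&& (m / 2 - 1)) % 2 = 0 := by omega
      have e2 : 2 * (m / 2 &&& (m / 2 - 1)) / 2 = m / 2 &&& (m / 2 - 1) := by omega
      rw [e1, e2, ih (m / 2) hlt hm2]; omega
    · rw [and_pred_odd m h]
      rw [popM_eq m, h, popM_eq (m - 1)]
      have e1 : (m - 1) % 2 = 0 := by omega
      have e2 : (m - 1) / 2 = m / 2 := by omega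
      rw [e1, e2]; omega

lemma evalWeightKern_eq (m : Nat) : ∀ c : Int, evalWeightKern m c = c + (popM m : Int) := by
  induction m using Nat.strong_induction_on with
  | _ m ih =>
    intro c
    by_cases h : m = 0
    · subst h; rw [evalWeightKern]; simp [popM_zero]
    · rw [evalWeightKern]
      simp only [h, if_false]
      have hlt : m &&& (m - 1) < m := by
        have := Nat.and_le_right (n := m) (m := m - 1); omega
      rw [ih _ hlt, popM_and_pred m h]
      push_cast; ring

-- low-bit decomposition of emod by 2*P
lemma emod_double_split (P v : Int) :
    v % (2 * P) % 2 = v % 2 ∧ v % (2 * P) / 2 = (v / 2) % P := by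
  constructor
  · exact Int.emod_emod_of_dvd v ⟨P, rfl⟩
  · have hq : v / 2 / P = v / (2 * P) := Int.ediv_ediv_of_nonneg (by omega)
    have hdef : v % (2 * P) = v + 2 * (-(P * (v / (2 * P)))) := by
      have := Int.mul_ediv_add_emod v (2 * P)
      nlinarith [this]
    rw [hdef, Int.add_mul_ediv_left _ _ (by omega : (2:Int) ≠ 0)]
    rw [Int.emod_def (v / 2) P, ← hq]
    ring

def stepA : Int × Int → Int × Int :=
  fun s => (s.1 >>> (1 : Nat), if PySem.Int.band s.1 1 ≠ 0 then s.2 + 1 else s.2)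

lemma foldA (l : List Int) : ∀ p : Int × Int,
    l.foldl (fun (s : Int × Int) _ =>
      (s.1 >>> (1 : Nat), if PySem.Int.band s.1 1 ≠ 0 then s.2 + 1 else s.2)) p
      = stepA^[l.length] p := by
  induction l with
  | nil => intro p; rfl
  | cons x xs ih =>
      intro p
      rw [List.foldl_cons, ih, List.length_cons, Function.iterate_succ_apply]
      rfl

lemma stepA_iterate (n : Nat) : ∀ (v acc : Int),
    stepA^[n] (v, acc) = (v >>> (n : Nat), acc + (popM ((v % (2 ^ n)).toNat) : Int)) := by
  induction n with
  | zero => intro v acc; simp [popM_zero]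
  | succ n ih =>
    intro v acc
    rw [Function.iterate_succ_apply]
    have hstep : stepA (v, acc) = (v >>> (1 : Nat), if PySem.Int.band v 1 ≠ 0 then acc + 1 else acc) := rfl
    rw [hstep, ih]
    simp only [Prod.mk.injEq]
    have hsr : v >>> (1 : Nat) = v / 2 := by
      rw [Int.shiftRight_eq_div_pow]; norm_num
    obtain ⟨e1, e2⟩ := emod_double_split (2 ^ n) v
    have hpow : (2:Int) * 2 ^ n = 2 ^ (n + 1) := by ring
    refine ⟨?_, ?_⟩
    · rw [hsr, Int.shiftRight_eq_div_pow, Int.shiftRight_eq_div_pow]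
      rw [Int.ediv_ediv_of_nonneg (by omega)]
      norm_num [pow_succ, mul_comm]
    · have hm2 : v % 2 = v % 2 := rfl
      have hband : PySem.Int.band v 1 = v % 2 := by
        rw [PySem.Int.band_one, PySem.Int.mod_eq_emod_of_pos (by omega)]
      have hM : popM ((v % (2 ^ (n + 1))).toNat)
          = (v % (2 ^ (n + 1))).toNat % 2 + popM ((v % (2 ^ (n + 1))).toNat / 2) :=
        popM_eq _
      have hnn : 0 ≤ v % (2 ^ (n + 1)) := Int.emod_nonneg v (by positivity)
      have hb' : (v % (2 ^ (n + 1))).toNat % 2 = (v % 2).toNat := by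
        have := e1; rw [hpow] at this; omega
      have hd' : (v % (2 ^ (n + 1))).toNat / 2 = ((v / 2) % (2 ^ n)).toNat := by
        have := e2; rw [hpow] at this
        have h2 : 0 ≤ (v / 2) % (2 ^ n) := Int.emod_nonneg _ (by positivity)
        omega
      rw [hM, hb', hd', hsr, hband]
      have : 0 ≤ v % 2 ∧ v % 2 < 2 := ⟨Int.emod_nonneg v (by omega), Int.emod_lt_of_pos v (by omega)⟩
      rcases (by omega : v % 2 = 0 ∨ v % 2 = 1) with h | h
      · simp [h]
      · simp [h]
        ring

-- ===== VERDICT (by name: the statement is the Claim_ definition above) =====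
theorem eval_weight_spec : Claim_equal_eval_weight := by
  intro value _
  unfold Spec_eval_weight eval_weight eval_weight_alt
  set x := PySem.Int.bxor value 65535 with hx
  dsimp only
  rw [foldA, stepA_iterate]
  rw [evalWeightKern_eq, PySem.Int.mod_eq_emod_of_pos (by omega)]
  have hlen : (PySem.List.pyRange 0 16 1).length = 16 := by decide
  rw [hlen]
  norm_num
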